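-- pv_equiv track=rewrite | github.com/elementary-particles-Man/THP-TCP | Olds/pytools/yaml_to_mermaid_simple.py | _to_mermaid
-- ===== SOURCE A (Python) =====
-- def _to_mermaid(pairs: list[tuple[int, str]]) -> str:
--     lines = ["flowchart TD", "  root[\"root\"]"]
--     stack: list[tuple[int, str]] = []
--     counter = 0
--     for indent, label in pairs:
--         node_id = f"n{counter}"
--         safe_label = label.replace('"', '\\"')
--         lines.append(f"  {node_id}[\"{safe_label}\"]")
--         while stack and indent <= stack[-1][0]:
--             stack.pop()
--         parent = "root" if not stack else stack[-1][1]
--         lines.append(f"  {parent} --> {node_id}")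
--         stack.append((indent, node_id))
--         counter += 1
--     return "\n".join(lines) + "\n"
-- ===== SOURCE B (Python) =====
-- def _to_mermaid(pairs: list[tuple[int, str]]) -> str:
--     indents = [p[0] for p in pairs]
--
--     def parent_id(i: int) -> str:
--         j = i - 1
--         while j >= 0:
--             if indents[j] < indents[i]:
--                 return "n%d" % j
--             j -= 1
--         return "root"
--
--     body = [line
--             for i in range(len(pairs))
--             for line in ('  n{}["{}"]'.format(i, pairs[i][1].replace('"', '\\"')),
--                          "  {} --> n{}".format(parent_id(i), i))]
--     return "\n".join(["flowchart TD", '  root["root"]'] + body) + "\n"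
-- ===== Notes on version B (the rewrite author's own statement) =====
-- stated objective: alternative
-- what changed: Replaces the one-pass monotonic stack by a stackless index-based construction: for each index i the parent is found by scanning indices j = i-1 down to 0 for the first strictly smaller indent, and the body lines are produced by a flat comprehension over range(len(pairs)).
import Mathlib
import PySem

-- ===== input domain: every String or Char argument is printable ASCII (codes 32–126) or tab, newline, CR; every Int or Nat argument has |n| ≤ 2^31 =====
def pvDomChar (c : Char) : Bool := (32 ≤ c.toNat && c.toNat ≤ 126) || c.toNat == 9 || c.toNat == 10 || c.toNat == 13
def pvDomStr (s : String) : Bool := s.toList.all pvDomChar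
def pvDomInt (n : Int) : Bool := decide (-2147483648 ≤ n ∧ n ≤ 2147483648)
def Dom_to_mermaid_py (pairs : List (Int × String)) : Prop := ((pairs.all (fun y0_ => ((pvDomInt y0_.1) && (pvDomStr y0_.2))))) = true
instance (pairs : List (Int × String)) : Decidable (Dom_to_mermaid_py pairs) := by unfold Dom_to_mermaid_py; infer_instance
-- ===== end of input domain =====

-- B keeps the exact output format but drops A's stack entirely: the body is a flat
-- comprehension over the indices, each node's parent found by a backward index scan
-- for the first strictly smaller indent.

-- ===== PORT A =====
-- the `while stack and indent <= stack[-1][0]: stack.pop()` loop (stack top = head)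
def popWhile (indent : Int) : List (Int × String) → List (Int × String)
  | [] => []
  | e :: rest => if indent ≤ e.1 then popWhile indent rest else e :: rest

-- the body of A's for-loop; state = (lines, stack, counter)
def stepA (st : List String × List (Int × String) × Int) (p : Int × String) :
    List String × List (Int × String) × Int :=
  let node_id := "n" ++ PySem.Int.toStr st.2.2
  let safe_label := PySem.Str.replace p.2 "\"" "\\\""
  let lines := st.1 ++ ["  " ++ node_id ++ "[\"" ++ safe_label ++ "\"]"]
  let stack := popWhile p.1 st.2.1
  let parent := match stack with | [] => "root" | e :: _ => e.2
  let lines := lines ++ ["  " ++ parent ++ " --> " ++ node_id]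
  (lines, (p.1, node_id) :: stack, st.2.2 + 1)

def to_mermaid_py (pairs : List (Int × String)) : String :=
  PySem.Str.join "\n" (pairs.foldl stepA (["flowchart TD", "  root[\"root\"]"], [], 0)).1 ++ "\n"

-- ===== PORT B =====
-- `while j >= 0: if indents[j] < indents[i] … j -= 1`, called with j = i-1
def parentScan (indents : List Int) (cur : Int) : Nat → String
  | 0 => "root"
  | j + 1 => if indents.getD j 0 < cur then "n" ++ PySem.Int.toStr (j : Int)
             else parentScan indents cur j

def parent_id (indents : List Int) (i : Nat) : String :=
  parentScan indents (indents.getD i 0) i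

-- the two lines the comprehension produces for index i
def nodeLines (indents : List Int) (i : Nat) (label : String) : List String :=
  let nid := "n" ++ PySem.Int.toStr (i : Int)
  ["  " ++ nid ++ "[\"" ++ PySem.Str.replace label "\"" "\\\"" ++ "\"]",
   "  " ++ parent_id indents i ++ " --> " ++ nid]

def to_mermaid_py_alt (pairs : List (Int × String)) : String :=
  let indents := pairs.map Prod.fst
  PySem.Str.join "\n"
    (["flowchart TD", "  root[\"root\"]"] ++
      (List.range pairs.length).flatMap (fun i => nodeLines indents i (pairs.getD i (0, "")).2)) ++ "\n"

-- ===== PRECONDITION & SPEC =====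
def Spec_to_mermaid_py (pairs : List (Int × String)) (out : String) : Prop := out = to_mermaid_py_alt pairs
instance (pairs : List (Int × String)) (out : String) : Decidable (Spec_to_mermaid_py pairs out) := by unfold Spec_to_mermaid_py; infer_instance

-- ===== CLAIM (what is proved, stated in full; the proofs are below) =====
def Claim_equal_to_mermaid_py : Prop := ∀ (pairs : List (Int × String)), Dom_to_mermaid_py pairs → Spec_to_mermaid_py pairs (to_mermaid_py pairs)

-- ===== LEMMAS AND PROOFS =====

-- history of the first i processed nodes, most recent first
def seenOf (indents : List Int) (i : Nat) : List (Int × String) :=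
  ((List.range i).map (fun j => (indents.getD j 0, "n" ++ PySem.Int.toStr (j : Int)))).reverse

lemma seenOf_succ (indents : List Int) (i : Nat) :
    seenOf indents (i + 1) =
      (indents.getD i 0, "n" ++ PySem.Int.toStr (i : Int)) :: seenOf indents i := by
  simp [seenOf, List.range_succ]

-- invariant tying A's stack to the history: for every threshold, the stack after
-- popping agrees (on its head) with the backward scan of the history
def StackInv (indents : List Int) (stack : List (Int × String)) (i : Nat) : Prop :=
  ∀ w : Int, (popWhile w stack).head? = (seenOf indents i).find? (fun e => decide (e.1 < w))

lemma popWhile_popWhile {w v : Int} (h : w ≤ v) (s : List (Int × String)) :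
    popWhile w (popWhile v s) = popWhile w s := by
  induction s with
  | nil => rfl
  | cons e rest ih =>
    by_cases hv : v ≤ e.1
    · have hw : w ≤ e.1 := le_trans h hv
      simp [popWhile, hv, hw, ih]
    · simp [popWhile, hv]

lemma inv_step {indents : List Int} {stack : List (Int × String)} {i : Nat}
    (h : StackInv indents stack i) :
    StackInv indents
      ((indents.getD i 0, "n" ++ PySem.Int.toStr (i : Int)) :: popWhile (indents.getD i 0) stack)
      (i + 1) := by
  intro w
  rw [seenOf_succ]
  by_cases hw : w ≤ indents.getD i 0
  · have hv : ¬ (indents.getD i 0 < w) := not_lt.mpr hw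
    simp only [popWhile, hw, if_true, List.find?_cons, hv, decide_false,
      popWhile_popWhile hw]
    exact h w
  · have hv : indents.getD i 0 < w := lt_of_not_ge hw
    simp only [List.getD] at hv hw
    simp [popWhile, hw, hv]

-- the backward scan computes exactly the head of the filtered history
lemma parentScan_eq_find (indents : List Int) (w : Int) (i : Nat) :
    parentScan indents w i =
      (match (seenOf indents i).find? (fun e => decide (e.1 < w)) with
        | none => "root" | some e => e.2) := by
  induction i with
  | zero => rfl
  | succ j ih =>
    rw [seenOf_succ]
    by_cases hj : indents.getD j 0 < w
    all_goals simp only [List.getD] at hj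
    · simp [parentScan, hj]
    · simp [parentScan, hj, ih]

-- the current pair is pairs[i]
lemma drop_getElem {α : Type} {l rest : List α} {p : α} {i : Nat}
    (h : l.drop i = p :: rest) : l[i]? = some p := by
  have : (l.drop i)[0]? = some p := by rw [h]; rfl
  simpa using this

-- main loop correspondence
lemma loop_eq (pairs : List (Int × String)) :
    ∀ (rest : List (Int × String)) (i : Nat) (lines : List String)
      (stack : List (Int × String)),
      pairs.drop i = rest → StackInv (pairs.map Prod.fst) stack i →
      (rest.foldl stepA (lines, stack, (i : Int))).1 =
        lines ++ (List.range' i rest.length).flatMap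
          (fun k => nodeLines (pairs.map Prod.fst) k (pairs.getD k (0, "")).2) := by
  intro rest
  induction rest with
  | nil => intro i lines stack _ _; simp
  | cons p rest ih =>
    intro i lines stack hdrop hInv
    have hgi : pairs[i]? = some p := drop_getElem hdrop
    have hindent : (pairs.map Prod.fst).getD i 0 = p.1 := by
      simp [List.getD, List.getElem?_map, hgi]
    have hlabel : (pairs.getD i (0, "")).2 = p.2 := by
      simp [List.getD, hgi]
    have hparent : (match popWhile p.1 stack with | [] => "root" | e :: _ => e.2)
        = parent_id (pairs.map Prod.fst) i := by
      rw [parent_id, hindent, parentScan_eq_find, ← hInv p.1]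
      cases popWhile p.1 stack <;> rfl
    have hA : stepA (lines, stack, (i : Int)) p =
        (lines ++ nodeLines (pairs.map Prod.fst) i (pairs.getD i (0, "")).2,
         (p.1, "n" ++ PySem.Int.toStr (i : Int)) :: popWhile p.1 stack,
         ((i + 1 : Nat) : Int)) := by
      simp only [List.getD] at hlabel
      simp [stepA, nodeLines, hparent, hlabel]
    have hdrop' : pairs.drop (i + 1) = rest := by
      have h1 : List.drop 1 (List.drop i pairs) = rest := by rw [hdrop]; rfl
      rw [List.drop_drop] at h1
      exact h1
    have hInv' : StackInv (pairs.map Prod.fst)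
        ((p.1, "n" ++ PySem.Int.toStr (i : Int)) :: popWhile p.1 stack) (i + 1) := by
      rw [← hindent]
      exact inv_step hInv
    simp only [List.foldl_cons, hA]
    rw [ih (i + 1) _ _ hdrop' hInv']
    simp [List.range', List.append_assoc]

-- ===== VERDICT (by name: the statement is the Claim_ definition above) =====
theorem to_mermaid_py_spec : Claim_equal_to_mermaid_py := by
  intro pairs _
  unfold Spec_to_mermaid_py to_mermaid_py to_mermaid_py_alt
  have h := loop_eq pairs pairs 0 ["flowchart TD", "  root[\"root\"]"] []
    (by simp) (by intro w; simp [seenOf, popWhile])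
  simp only [Nat.cast_zero] at h
  rw [h]
  simp [List.range_eq_range']
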